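-- pv_equiv track=rewrite | github.com/NunoSantana101/saimone3 | agent_data_pipeline.py | detect_data_category
-- ===== SOURCE A (Python) =====
-- from typing import Any, Dict, List, Optional, Tuple, Union
-- from enum import Enum
--
-- class DataCategory(str, Enum):
--     """Categories of data that can flow through the pipeline."""
--     SEARCH_RESULTS = "search_results"
--     CLINICAL_TRIALS = "clinical_trials"
--     REGULATORY = "regulatory"
--     SAFETY = "safety"
--     KOL = "kol"
--     STATISTICAL = "statistical"
--     LITERATURE = "literature"
--     AGGREGATED = "aggregated"
--     RAW = "raw"
--
-- def detect_data_category(data: Dict[str, Any], source: str = None) -> DataCategory: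
--     """
--     Detect the category of data based on structure and source.
--     """
--     # Check for aggregated search results
--     if "results_by_source" in data:
--         return DataCategory.AGGREGATED
--
--     # Check source-based categories
--     source_lower = (source or data.get("source", "")).lower()
--
--     if any(s in source_lower for s in ["clinical", "trial", "ctgov", "euctr"]):
--         return DataCategory.CLINICAL_TRIALS
--     if any(s in source_lower for s in ["fda", "ema", "regulatory", "approval"]):
--         return DataCategory.REGULATORY
--     if any(s in source_lower for s in ["faers", "safety", "adverse"]):
--         return DataCategory.SAFETY
--     if any(s in source_lower for s in ["kol", "investigator", "openalex", "orcid"]):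
--         return DataCategory.KOL
--     if any(s in source_lower for s in ["pubmed", "literature", "crossref", "biorxiv"]):
--         return DataCategory.LITERATURE
--     if any(s in source_lower for s in ["monte_carlo", "bayesian", "statistical"]):
--         return DataCategory.STATISTICAL
--
--     # Default to search results if has results array
--     if "results" in data:
--         return DataCategory.SEARCH_RESULTS
--
--     return DataCategory.RAW
-- ===== SOURCE B (Python) =====
-- from enum import Enum
--
-- class DataCategory(str, Enum):
--     SEARCH_RESULTS = "search_results"
--     CLINICAL_TRIALS = "clinical_trials"
--     REGULATORY = "regulatory"
--     SAFETY = "safety"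
--     KOL = "kol"
--     STATISTICAL = "statistical"
--     LITERATURE = "literature"
--     AGGREGATED = "aggregated"
--     RAW = "raw"
--
-- # One hash index keyword -> priority; the category list by priority.
-- KEYWORD_PRIORITY = {
--     "clinical": 0, "trial": 0, "ctgov": 0, "euctr": 0,
--     "fda": 1, "ema": 1, "regulatory": 1, "approval": 1,
--     "faers": 2, "safety": 2, "adverse": 2,
--     "kol": 3, "investigator": 3, "openalex": 3, "orcid": 3,
--     "pubmed": 4, "literature": 4, "crossref": 4, "biorxiv": 4,
--     "monte_carlo": 5, "bayesian": 5, "statistical": 5,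
-- }
-- KEYWORD_LENGTHS = sorted({len(k) for k in KEYWORD_PRIORITY})
-- PRIORITY_CATEGORIES = [
--     DataCategory.CLINICAL_TRIALS, DataCategory.REGULATORY, DataCategory.SAFETY,
--     DataCategory.KOL, DataCategory.LITERATURE, DataCategory.STATISTICAL,
-- ]
--
-- def detect_data_category(data, source=None):
--     if "results_by_source" in data:
--         return DataCategory.AGGREGATED
--     s = (source or data.get("source", "")).lower()
--     # Single scan over the string: every window that is a known keyword is
--     # found by one dict lookup; the best (lowest) priority wins.
--     hits = [p for i in range(len(s)) for L in KEYWORD_LENGTHS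
--             if (p := KEYWORD_PRIORITY.get(s[i:i + L])) is not None]
--     if hits:
--         return PRIORITY_CATEGORIES[min(hits)]
--     return DataCategory.SEARCH_RESULTS if "results" in data else DataCategory.RAW
-- ===== Notes on version B (the rewrite author's own statement) =====
-- stated objective: alternative
-- what changed: Instead of A's six per-category any(keyword in source) scans, B makes one pass over the lowered source string, looking each fixed-length window up in a single keyword->priority hash index, and returns the category of the least matched priority; the two structural guards (results_by_source, results/raw) are kept.
import Mathlib
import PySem

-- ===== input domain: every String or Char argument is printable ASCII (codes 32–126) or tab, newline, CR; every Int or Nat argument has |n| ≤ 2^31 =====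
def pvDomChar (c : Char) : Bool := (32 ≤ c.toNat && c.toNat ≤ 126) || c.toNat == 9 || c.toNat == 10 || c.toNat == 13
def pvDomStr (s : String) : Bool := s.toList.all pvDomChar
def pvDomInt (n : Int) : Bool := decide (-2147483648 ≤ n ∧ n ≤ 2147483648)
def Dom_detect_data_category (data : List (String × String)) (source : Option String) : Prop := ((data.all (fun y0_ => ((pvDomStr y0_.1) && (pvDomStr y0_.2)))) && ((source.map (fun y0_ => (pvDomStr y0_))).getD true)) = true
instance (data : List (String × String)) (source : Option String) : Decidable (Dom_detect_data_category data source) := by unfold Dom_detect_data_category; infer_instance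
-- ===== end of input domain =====

-- B replaces A's six per-category any()-scans by a single window scan over the lowered source string: each window is one hash-index lookup keyword -> priority, and the least matched priority picks the category (objective: alternative).


-- ===== PORT A =====
-- literal transliteration of A: guard, then six explicit if-any branches, then default guards
def detect_data_category (data : List (String × String)) (source : Option String) : String :=
  let d := PySem.Dict.mk data
  if d.contains "results_by_source" then "aggregated"
  else
    -- (source or data.get("source", "")): None and "" are falsy
    let src : String := match source with
      | some s => if s = "" then d.getD "source" "" else s
      | none => d.getD "source" ""
    let sl := PySem.Str.lower src
    if ["clinical", "trial", "ctgov", "euctr"].any (fun k => PySem.Str.isIn k sl) then "clinical_trials"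
    else if ["fda", "ema", "regulatory", "approval"].any (fun k => PySem.Str.isIn k sl) then "regulatory"
    else if ["faers", "safety", "adverse"].any (fun k => PySem.Str.isIn k sl) then "safety"
    else if ["kol", "investigator", "openalex", "orcid"].any (fun k => PySem.Str.isIn k sl) then "kol"
    else if ["pubmed", "literature", "crossref", "biorxiv"].any (fun k => PySem.Str.isIn k sl) then "literature"
    else if ["monte_carlo", "bayesian", "statistical"].any (fun k => PySem.Str.isIn k sl) then "statistical"
    else if d.contains "results" then "search_results"
    else "raw"

-- ===== PORT B =====
-- Source B's hash index KEYWORD_PRIORITY (keyword -> priority), its key-length set, and the category list by priority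
def kwPairs : List (String × Int) :=
  [("clinical", 0), ("trial", 0), ("ctgov", 0), ("euctr", 0),
   ("fda", 1), ("ema", 1), ("regulatory", 1), ("approval", 1),
   ("faers", 2), ("safety", 2), ("adverse", 2),
   ("kol", 3), ("investigator", 3), ("openalex", 3), ("orcid", 3),
   ("pubmed", 4), ("literature", 4), ("crossref", 4), ("biorxiv", 4),
   ("monte_carlo", 5), ("bayesian", 5), ("statistical", 5)]

def kwPriority : PySem.Dict String Int := PySem.Dict.mk kwPairs

def kwLengths : List Int := [3, 5, 6, 7, 8, 10, 11, 12]

def priorityCategories : List String :=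
  ["clinical_trials", "regulatory", "safety", "kol", "literature", "statistical"]

-- the comprehension: every window s[i:i+L] looked up in the hash index (the walrus 'get' is the filterMap)
def pvHits (sl : List Char) : List Int :=
  (PySem.List.pyRange 0 (PySem.List.len sl) 1).flatMap (fun i =>
    kwLengths.filterMap (fun L =>
      kwPriority.get? (String.ofList (PySem.List.slice sl (some i) (some (i + L))))))

def detect_data_category_alt (data : List (String × String)) (source : Option String) : String :=
  let d := PySem.Dict.mk data
  if d.contains "results_by_source" then "aggregated"
  else
    let src : String := match source with
      | some s => if s = "" then d.getD "source" "" else s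
      | none => d.getD "source" ""
    let sl : List Char := (PySem.Str.lower src).toList
    match PySem.List.min? (pvHits sl) (fun x => x) with
    | some m => (PySem.List.pyGet? priorityCategories m).getD "raw"  -- the min hit is always in range; getD only totalises
    | none => if d.contains "results" then "search_results" else "raw"

-- ===== PRECONDITION & SPEC =====
def Spec_detect_data_category (data : List (String × String)) (source : Option String) (out : String) : Prop := out = detect_data_category_alt data source
instance (data : List (String × String)) (source : Option String) (out : String) : Decidable (Spec_detect_data_category data source out) := by unfold Spec_detect_data_category; infer_instance

-- ===== CLAIM (what is proved, stated in full; the proofs are below) =====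
def Claim_equal_detect_data_category : Prop := ∀ (data : List (String × String)) (source : Option String), Dom_detect_data_category data source → Spec_detect_data_category data source (detect_data_category data source)

-- ===== LEMMAS AND PROOFS =====

-- a window of the scan is an infix of the scanned string
theorem slice_isInfix (sl : List Char) (i L : Int) (hi : 0 ≤ i) (hL : 0 ≤ L) :
    PySem.List.slice sl (some i) (some (i + L)) <:+: sl := by
  rw [PySem.List.slice_toNat sl hi (by omega)]
  exact ((sl.drop i.toNat).take_prefix _).isInfix.trans (sl.drop_suffix i.toNat).isInfix

-- the scan reaches every infix whose length is one of the window lengths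
theorem scan_finds (sl ks : List Char) (hne : ks ≠ []) (hL : (ks.length : Int) ∈ kwLengths)
    (h : ks <:+: sl) :
    ∃ i : Int, (0 ≤ i ∧ i < (sl.length : Int)) ∧ ∃ L ∈ kwLengths,
      PySem.List.slice sl (some i) (some (i + L)) = ks := by
  obtain ⟨t, u, rfl⟩ := h
  refine ⟨(t.length : Int), ⟨by positivity, ?_⟩, (ks.length : Int), hL, ?_⟩
  · have hk0 : ks.length ≠ 0 := fun h0 => hne (List.eq_nil_of_length_eq_zero h0)
    have : t.length < (t ++ ks ++ u).length := by simp [List.length_append]; omega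
    exact_mod_cast this
  · rw [PySem.List.slice_natCast_add, List.append_assoc, List.drop_left, List.take_left]

-- the members of the hit list are exactly the priorities of the keywords occurring in sl
theorem mem_pvHits (sl : List Char) (p : Int) :
    p ∈ pvHits sl ↔ ∃ kv ∈ kwPairs, kv.2 = p ∧ PySem.Chars.isIn kv.1.toList sl = true := by
  have hnd : kwPriority.keys.Nodup := by decide
  constructor
  · intro h
    simp only [pvHits, List.mem_flatMap, List.mem_filterMap, PySem.List.len_eq,
      PySem.List.mem_pyRange_one] at h
    obtain ⟨i, ⟨hi0, hilen⟩, L, hLmem, hget⟩ := h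
    have hmem := (PySem.Dict.get?_eq_some_iff_mem_items _ _ _ hnd).mp hget
    have hLpos : (0:Int) ≤ L := by
      simp only [kwLengths, List.mem_cons, List.not_mem_nil, or_false] at hLmem
      rcases hLmem with rfl | rfl | rfl | rfl | rfl | rfl | rfl | rfl <;> norm_num
    refine ⟨_, hmem, rfl, ?_⟩
    rw [PySem.Chars.isIn_iff_infix, String.toList_ofList]
    exact slice_isInfix sl i L hi0 hLpos
  · rintro ⟨kv, hmem, rfl, hin⟩
    have hinf := (PySem.Chars.isIn_iff_infix _ _).mp hin
    have hne : kv.1.toList ≠ [] := by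
      revert hmem; simp only [kwPairs, List.mem_cons, List.not_mem_nil, or_false]
      rintro (rfl | rfl | rfl | rfl | rfl | rfl | rfl | rfl | rfl | rfl | rfl |
        rfl | rfl | rfl | rfl | rfl | rfl | rfl | rfl | rfl | rfl | rfl) <;> decide
    have hLmem : ((kv.1.toList.length : Nat) : Int) ∈ kwLengths := by
      revert hmem; simp only [kwPairs, List.mem_cons, List.not_mem_nil, or_false]
      rintro (rfl | rfl | rfl | rfl | rfl | rfl | rfl | rfl | rfl | rfl | rfl |
        rfl | rfl | rfl | rfl | rfl | rfl | rfl | rfl | rfl | rfl | rfl) <;> decide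
    obtain ⟨i, ⟨hi0, hilen⟩, L, hLm, hsl⟩ := scan_finds sl kv.1.toList hne hLmem hinf
    simp only [pvHits, List.mem_flatMap, List.mem_filterMap, PySem.List.len_eq,
      PySem.List.mem_pyRange_one]
    refine ⟨i, ⟨hi0, hilen⟩, L, hLm, ?_⟩
    rw [hsl]
    rw [String.ofList_toList]
    exact (PySem.Dict.get?_eq_some_iff_mem_items _ _ _ hnd).mpr hmem

-- the Python min of the hit list, given a member that is a lower bound
theorem min_pvHits (sl : List Char) (j : Int) (hj : j ∈ pvHits sl)
    (hlb : ∀ b ∈ pvHits sl, j ≤ b) :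
    PySem.List.min? (pvHits sl) (fun x => x) = some j := by
  cases hmin : PySem.List.min? (pvHits sl) (fun x => x) with
  | none =>
      rw [PySem.List.min?_eq_none_iff] at hmin
      rw [hmin] at hj
      exact absurd hj (List.not_mem_nil)
  | some m =>
      have h1 : j ≤ m := hlb m (PySem.List.min?_mem hmin)
      have h2 : m ≤ j := PySem.List.min?_isMin hmin j hj
      have : m = j := le_antisymm h2 h1
      rw [this]

-- a lower bound on the hits from the falsity of the higher-priority conditions
theorem pvHits_lb (sl : List Char) (j : Int)
    (h : ∀ kv ∈ kwPairs, kv.2 < j → PySem.Chars.isIn kv.1.toList sl = false) :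
    ∀ b ∈ pvHits sl, j ≤ b := by
  intro b hb
  obtain ⟨kv, hkv, hpe, hin⟩ := (mem_pvHits sl b).mp hb
  subst hpe
  by_contra hlt
  have := h kv hkv (by omega)
  rw [this] at hin
  exact absurd hin (by simp)

-- the scan-and-min equals A's if-chain, for any default
theorem core (sl : List Char) (dflt : String) :
    (match PySem.List.min? (pvHits sl) (fun x => x) with
     | some m => (PySem.List.pyGet? priorityCategories m).getD "raw"
     | none => dflt) =
    (if ["clinical", "trial", "ctgov", "euctr"].any (fun k => PySem.Chars.isIn k.toList sl) then "clinical_trials"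
     else if ["fda", "ema", "regulatory", "approval"].any (fun k => PySem.Chars.isIn k.toList sl) then "regulatory"
     else if ["faers", "safety", "adverse"].any (fun k => PySem.Chars.isIn k.toList sl) then "safety"
     else if ["kol", "investigator", "openalex", "orcid"].any (fun k => PySem.Chars.isIn k.toList sl) then "kol"
     else if ["pubmed", "literature", "crossref", "biorxiv"].any (fun k => PySem.Chars.isIn k.toList sl) then "literature"
     else if ["monte_carlo", "bayesian", "statistical"].any (fun k => PySem.Chars.isIn k.toList sl) then "statistical"
     else dflt) := by
  by_cases h1 : (["clinical", "trial", "ctgov", "euctr"].any (fun k => PySem.Chars.isIn k.toList sl) = true)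
  · obtain ⟨k, hk, hik⟩ := List.any_eq_true.mp h1
    have hj : (0:Int) ∈ pvHits sl := (mem_pvHits sl 0).mpr ⟨(k, 0), by fin_cases hk <;> decide, rfl, hik⟩
    have hlb := pvHits_lb sl 0 (by intro kv hkv hlt; fin_cases hkv <;> simp_all)
    rw [min_pvHits sl 0 hj hlb]
    simp [h1]
    decide
  by_cases h2 : (["fda", "ema", "regulatory", "approval"].any (fun k => PySem.Chars.isIn k.toList sl) = true)
  · obtain ⟨k, hk, hik⟩ := List.any_eq_true.mp h2
    have hj : (1:Int) ∈ pvHits sl := (mem_pvHits sl 1).mpr ⟨(k, 1), by fin_cases hk <;> decide, rfl, hik⟩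
    have hlb := pvHits_lb sl 1 (by intro kv hkv hlt; fin_cases hkv <;> simp_all)
    rw [min_pvHits sl 1 hj hlb]
    simp [h1, h2]
    decide
  by_cases h3 : (["faers", "safety", "adverse"].any (fun k => PySem.Chars.isIn k.toList sl) = true)
  · obtain ⟨k, hk, hik⟩ := List.any_eq_true.mp h3
    have hj : (2:Int) ∈ pvHits sl := (mem_pvHits sl 2).mpr ⟨(k, 2), by fin_cases hk <;> decide, rfl, hik⟩
    have hlb := pvHits_lb sl 2 (by intro kv hkv hlt; fin_cases hkv <;> simp_all)
    rw [min_pvHits sl 2 hj hlb]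
    simp [h1, h2, h3]
    decide
  by_cases h4 : (["kol", "investigator", "openalex", "orcid"].any (fun k => PySem.Chars.isIn k.toList sl) = true)
  · obtain ⟨k, hk, hik⟩ := List.any_eq_true.mp h4
    have hj : (3:Int) ∈ pvHits sl := (mem_pvHits sl 3).mpr ⟨(k, 3), by fin_cases hk <;> decide, rfl, hik⟩
    have hlb := pvHits_lb sl 3 (by intro kv hkv hlt; fin_cases hkv <;> simp_all)
    rw [min_pvHits sl 3 hj hlb]
    simp [h1, h2, h3, h4]
    decide
  by_cases h5 : (["pubmed", "literature", "crossref", "biorxiv"].any (fun k => PySem.Chars.isIn k.toList sl) = true)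
  · obtain ⟨k, hk, hik⟩ := List.any_eq_true.mp h5
    have hj : (4:Int) ∈ pvHits sl := (mem_pvHits sl 4).mpr ⟨(k, 4), by fin_cases hk <;> decide, rfl, hik⟩
    have hlb := pvHits_lb sl 4 (by intro kv hkv hlt; fin_cases hkv <;> simp_all)
    rw [min_pvHits sl 4 hj hlb]
    simp [h1, h2, h3, h4, h5]
    decide
  by_cases h6 : (["monte_carlo", "bayesian", "statistical"].any (fun k => PySem.Chars.isIn k.toList sl) = true)
  · obtain ⟨k, hk, hik⟩ := List.any_eq_true.mp h6
    have hj : (5:Int) ∈ pvHits sl := (mem_pvHits sl 5).mpr ⟨(k, 5), by fin_cases hk <;> decide, rfl, hik⟩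
    have hlb := pvHits_lb sl 5 (by intro kv hkv hlt; fin_cases hkv <;> simp_all)
    rw [min_pvHits sl 5 hj hlb]
    simp [h1, h2, h3, h4, h5, h6]
    decide
  have hnil : pvHits sl = [] := by
    refine List.eq_nil_iff_forall_not_mem.mpr (fun p hp => ?_)
    obtain ⟨kv, hkv, hpe, hin⟩ := (mem_pvHits sl p).mp hp
    fin_cases hkv <;> simp_all
  rw [hnil]
  have hm : PySem.List.min? ([] : List Int) (fun x => x) = none := by
    rw [PySem.List.min?_eq_none_iff]
  rw [hm]
  simp [h1, h2, h3, h4, h5, h6]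

-- ===== VERDICT (by name: the statement is the Claim_ definition above) =====
theorem detect_data_category_spec : Claim_equal_detect_data_category := by
  intro data source _
  unfold Spec_detect_data_category detect_data_category detect_data_category_alt
  by_cases hagg : (PySem.Dict.mk data).contains "results_by_source" = true
  · simp only [hagg, if_true]
  · simp only [Bool.not_eq_true] at *
    simp only [hagg, Bool.false_eq_true, if_false]
    rw [core]
    simp
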